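-- pv_equiv track=rewrite | github.com/salmandjing/contract-ai | agents/template_generator_entrypoint.py | detect_contract_type
-- ===== SOURCE A (Python) =====
-- def detect_contract_type(text):
--     """Detect contract type from email text"""
--     text_lower = text.lower()
--
--     if any(word in text_lower for word in ['power purchase', 'ppa', 'electricity purchase', 'power supply']):
--         return 'power_purchase'
--     elif any(word in text_lower for word in ['energy supply', 'gas supply', 'fuel supply']):
--         return 'energy_supply'
--     elif any(word in text_lower for word in ['renewable', 'rec', 'renewable energy certificate', 'green energy']):
--         return 'renewable_energy'
--     elif any(word in text_lower for word in ['grid connection', 'interconnection', 'transmission']):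
--         return 'grid_connection'
--     elif any(word in text_lower for word in ['energy storage', 'battery', 'storage service']):
--         return 'energy_storage'
--     elif any(word in text_lower for word in ['offtake', 'energy offtake', 'power offtake']):
--         return 'offtake'
--     else:
--         return 'power_purchase'
-- ===== SOURCE B (Python) =====
-- CONTRACT_LABELS = ['power_purchase', 'energy_supply', 'renewable_energy',
--                    'grid_connection', 'energy_storage', 'offtake']
-- CONTRACT_KEYWORDS = [
--     ['power purchase', 'ppa', 'electricity purchase', 'power supply'],
--     ['energy supply', 'gas supply', 'fuel supply'],
--     ['renewable', 'rec', 'renewable energy certificate', 'green energy'],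
--     ['grid connection', 'interconnection', 'transmission'],
--     ['energy storage', 'battery', 'storage service'],
--     ['offtake', 'energy offtake', 'power offtake'],
-- ]
--
-- def detect_contract_type(text):
--     """Collect every matching category, then pick the highest-priority (lowest-index) one."""
--     t = text.lower()
--     matched = [i for i, kws in enumerate(CONTRACT_KEYWORDS)
--                if any(kw in t for kw in kws)]
--     return CONTRACT_LABELS[min(matched)] if matched else 'power_purchase'
-- ===== Notes on version B (the rewrite author's own statement) =====
-- stated objective: alternative
-- what changed: Instead of a short-circuiting if-elif priority chain, B exhaustively computes the full set of matching category indices and then selects the best one by arg-min over priorities (indexing into a label list), with the same default.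
import Mathlib
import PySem

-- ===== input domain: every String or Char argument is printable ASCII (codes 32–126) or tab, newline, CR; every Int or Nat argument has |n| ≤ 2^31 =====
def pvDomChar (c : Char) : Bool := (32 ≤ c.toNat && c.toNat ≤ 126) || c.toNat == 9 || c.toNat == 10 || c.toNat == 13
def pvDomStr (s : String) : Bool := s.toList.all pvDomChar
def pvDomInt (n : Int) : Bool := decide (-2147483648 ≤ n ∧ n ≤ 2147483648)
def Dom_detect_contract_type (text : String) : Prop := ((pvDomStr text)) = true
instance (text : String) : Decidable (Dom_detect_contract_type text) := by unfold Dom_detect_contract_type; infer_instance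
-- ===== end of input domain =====

-- B replaces the short-circuit if-elif chain by an exhaustive match-set + arg-min over category priorities (alternative decomposition).


-- ===== PORT A =====
def detect_contract_type (text : String) : String :=
  let text_lower := PySem.Str.lower text
  if ["power purchase", "ppa", "electricity purchase", "power supply"].any
      (fun word => PySem.Str.isIn word text_lower) then "power_purchase"
  else if ["energy supply", "gas supply", "fuel supply"].any
      (fun word => PySem.Str.isIn word text_lower) then "energy_supply"
  else if ["renewable", "rec", "renewable energy certificate", "green energy"].any
      (fun word => PySem.Str.isIn word text_lower) then "renewable_energy"
  else if ["grid connection", "interconnection", "transmission"].any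
      (fun word => PySem.Str.isIn word text_lower) then "grid_connection"
  else if ["energy storage", "battery", "storage service"].any
      (fun word => PySem.Str.isIn word text_lower) then "energy_storage"
  else if ["offtake", "energy offtake", "power offtake"].any
      (fun word => PySem.Str.isIn word text_lower) then "offtake"
  else "power_purchase"

-- ===== PORT B =====
def CONTRACT_LABELS : List String :=
  ["power_purchase", "energy_supply", "renewable_energy",
   "grid_connection", "energy_storage", "offtake"]

def CONTRACT_KEYWORDS : List (List String) :=
  [["power purchase", "ppa", "electricity purchase", "power supply"],
   ["energy supply", "gas supply", "fuel supply"],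
   ["renewable", "rec", "renewable energy certificate", "green energy"],
   ["grid connection", "interconnection", "transmission"],
   ["energy storage", "battery", "storage service"],
   ["offtake", "energy offtake", "power offtake"]]

def detect_contract_type_alt (text : String) : String :=
  let t := PySem.Str.lower text
  -- matched = [i for i, kws in enumerate(CONTRACT_KEYWORDS) if any(kw in t for kw in kws)]
  let matched : List Int :=
    ((PySem.List.enumerate CONTRACT_KEYWORDS).filter
      (fun p => p.2.any (fun kw => PySem.Str.isIn kw t))).map Prod.fst
  -- CONTRACT_LABELS[min(matched)] if matched else 'power_purchase'
  match matched.min? with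
  | some i => (PySem.List.pyGet? CONTRACT_LABELS i).getD "power_purchase"
  | none => "power_purchase"

-- ===== PRECONDITION & SPEC =====
def Spec_detect_contract_type (text : String) (out : String) : Prop := out = detect_contract_type_alt text
instance (text : String) (out : String) : Decidable (Spec_detect_contract_type text out) := by unfold Spec_detect_contract_type; infer_instance

-- ===== CLAIM =====
def Claim_equal_detect_contract_type : Prop := ∀ (text : String), Dom_detect_contract_type text → Spec_detect_contract_type text (detect_contract_type text)

-- ===== LEMMAS AND PROOFS =====

-- ===== VERDICT =====
theorem detect_contract_type_spec : Claim_equal_detect_contract_type := by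
  intro text _
  unfold Spec_detect_contract_type detect_contract_type detect_contract_type_alt CONTRACT_KEYWORDS
  simp only [PySem.List.enumerate_cons, PySem.List.enumerate_nil, List.filter_cons,
    List.filter_nil]
  cases h0 : (["power purchase", "ppa", "electricity purchase", "power supply"].any
      (fun word => PySem.Str.isIn word (PySem.Str.lower text))) <;>
  cases h1 : (["energy supply", "gas supply", "fuel supply"].any
      (fun word => PySem.Str.isIn word (PySem.Str.lower text))) <;>
  cases h2 : (["renewable", "rec", "renewable energy certificate", "green energy"].any
      (fun word => PySem.Str.isIn word (PySem.Str.lower text))) <;>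
  cases h3 : (["grid connection", "interconnection", "transmission"].any
      (fun word => PySem.Str.isIn word (PySem.Str.lower text))) <;>
  cases h4 : (["energy storage", "battery", "storage service"].any
      (fun word => PySem.Str.isIn word (PySem.Str.lower text))) <;>
  cases h5 : (["offtake", "energy offtake", "power offtake"].any
      (fun word => PySem.Str.isIn word (PySem.Str.lower text))) <;>
  simp [CONTRACT_LABELS, PySem.List.pyGet?, PySem.List.pyIdx?]
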